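-- pv_equiv track=rewrite | github.com/smithhmark/python_code_puzzles | sequences/greatestspan.py | simplest
-- ===== SOURCE A (Python) =====
-- def simplest(vals):
--     sz = len(vals)
--     longest_so_far = 0
--     for ii, left in enumerate(vals):
--         for jj in range(sz-1, ii, -1):
--             right = vals[jj]
--             if right > left:
--                 if jj - ii > longest_so_far:
--                     longest_so_far = jj - ii
--     return longest_so_far
-- ===== SOURCE B (Python) =====
-- def simplest(vals):
--     # strict prefix minima as (value, index), values strictly decreasing
--     mins = []
--     for i, v in enumerate(vals):
--         if not mins or v < mins[-1][0]:
--             mins.append((v, i))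
--     best = 0
--     for j, v in enumerate(vals):
--         for mv, mi in mins:
--             if mv < v:
--                 if mi < j and j - mi > best:
--                     best = j - mi
--                 break
--     return best
-- ===== Notes on version B (the rewrite author's own statement) =====
-- stated objective: faster
-- what changed: Instead of scanning, for every left index, all later indices from the right for a larger value, B builds the strict prefix-minima list once and for each position finds (first hit, then break) the earliest smaller prefix-minimum, so the quadratic inner scan over all indices disappears.
import Mathlib
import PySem

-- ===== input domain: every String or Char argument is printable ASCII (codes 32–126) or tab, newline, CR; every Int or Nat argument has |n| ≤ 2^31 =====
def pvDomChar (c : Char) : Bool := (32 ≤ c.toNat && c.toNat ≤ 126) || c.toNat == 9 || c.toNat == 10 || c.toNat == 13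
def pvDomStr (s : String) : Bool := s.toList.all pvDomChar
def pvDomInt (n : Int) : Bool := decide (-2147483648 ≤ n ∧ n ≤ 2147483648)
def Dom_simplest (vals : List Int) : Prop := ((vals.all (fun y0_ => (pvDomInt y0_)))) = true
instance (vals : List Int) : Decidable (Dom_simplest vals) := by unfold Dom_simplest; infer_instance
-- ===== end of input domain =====

-- B replaces A's per-left-index backward scan by a prefix-minima list built once and
-- scanned (with early break) per position; equivalence of the two is proved below.

-- ===== PORT A =====
def simplest (vals : List Int) : Int :=
  let sz : Int := (vals.length : Int)
  (PySem.List.enumerate vals).foldl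
    (fun longest p =>
      (PySem.List.pyRange (sz - 1) p.1 (-1)).foldl
        (fun longest jj =>
          let right := PySem.List.pyGetD vals jj 0
          if right > p.2 then (if jj - p.1 > longest then jj - p.1 else longest) else longest)
        longest)
    0

-- ===== PORT B =====
-- one step of Source B's first loop: append (v, i) iff mins is empty or v < last value
def minsStep (ms : List (Int × Int)) (p : Int × Int) : List (Int × Int) :=
  match ms.getLast? with
  | none => ms ++ [(p.2, p.1)]
  | some q => if p.2 < q.1 then ms ++ [(p.2, p.1)] else ms

-- Source B's first loop: the strict prefix minima as (value, index)
def pvMins (vals : List Int) : List (Int × Int) :=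
  (PySem.List.enumerate vals).foldl minsStep []

def simplest_alt (vals : List Int) : Int :=
  let mins := pvMins vals
  (PySem.List.enumerate vals).foldl
    (fun best p =>
      match mins.find? (fun q => decide (q.1 < p.2)) with
      | none => best
      | some q => if q.2 < p.1 then (if p.1 - q.2 > best then p.1 - q.2 else best) else best)
    0

-- ===== PRECONDITION & SPEC =====
def Spec_simplest (vals : List Int) (out : Int) : Prop := out = simplest_alt vals
instance (vals : List Int) (out : Int) : Decidable (Spec_simplest vals out) := by unfold Spec_simplest; infer_instance

-- ===== CLAIM (what is proved, stated in full; the proofs are below) =====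
def Claim_equal_simplest : Prop := ∀ (vals : List Int), Dom_simplest vals → Spec_simplest vals (simplest vals)

-- ===== LEMMAS AND PROOFS =====

-- generic facts about max-accumulating folds
theorem pv_foldl_ge_init {α : Type} (f : Int → α → Int) (h : ∀ a x, a ≤ f a x) :
    ∀ (l : List α) (a : Int), a ≤ l.foldl f a := by
  intro l
  induction l with
  | nil => intro a; simp
  | cons x t ih => intro a; exact le_trans (h a x) (ih (f a x))

theorem pv_foldl_ge_elem {α : Type} (f : Int → α → Int) (h : ∀ a x, a ≤ f a x)
    (c : Int) (x0 : α) (h2 : ∀ a, c ≤ f a x0) :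
    ∀ (l : List α) (a : Int), x0 ∈ l → c ≤ l.foldl f a := by
  intro l
  induction l with
  | nil => intro a hx; cases hx
  | cons x t ih =>
      intro a hx
      rcases List.mem_cons.mp hx with h0 | h0
      · subst h0; exact le_trans (h2 a) (pv_foldl_ge_init f h t (f a x0))
      · exact ih (f a x) h0

theorem pv_foldl_cases {α : Type} (f : Int → α → Int) (P : α → Int → Prop)
    (h : ∀ a x, f a x = a ∨ P x (f a x)) :
    ∀ (l : List α) (a : Int), l.foldl f a = a ∨ ∃ x ∈ l, P x (l.foldl f a) := by
  intro l
  induction l with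
  | nil => intro a; left; rfl
  | cons x t ih =>
      intro a
      rcases ih (f a x) with h0 | h0
      · rcases h a x with h1 | h1
        · left; simpa [h1] using h0
        · right; exact ⟨x, List.mem_cons_self, by simpa [h0] using h1⟩
      · right
        rcases h0 with ⟨y, hy, hP⟩
        exact ⟨y, List.mem_cons_of_mem _ hy, by simpa using hP⟩

-- A valid pair: i < j, j in range, vals[i] < vals[j]
def pvValid (vals : List Int) (i j : Nat) : Prop :=
  i < j ∧ j < vals.length ∧ vals.getD i 0 < vals.getD j 0

theorem pv_innerMono (vals : List Int) (p : Int × Int) :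
    ∀ (b jj : Int),
      b ≤ (let right := PySem.List.pyGetD vals jj 0;
           if right > p.2 then (if jj - p.1 > b then jj - p.1 else b) else b) := by
  intro b jj
  dsimp only
  split_ifs <;> omega

theorem pv_outerMono (vals : List Int) :
    ∀ (a : Int) (p : Int × Int),
      a ≤ (PySem.List.pyRange ((vals.length : Int) - 1) p.1 (-1)).foldl
            (fun longest jj =>
              let right := PySem.List.pyGetD vals jj 0
              if right > p.2 then (if jj - p.1 > longest then jj - p.1 else longest) else longest)
            a := by
  intro a p
  exact pv_foldl_ge_init _ (pv_innerMono vals p) _ a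

theorem A_nonneg (vals : List Int) : 0 ≤ simplest vals := by
  unfold simplest
  exact pv_foldl_ge_init _ (pv_outerMono vals) _ 0

theorem A_ge (vals : List Int) (i j : Nat) (hv : pvValid vals i j) :
    ((j : Int) - i) ≤ simplest vals := by
  obtain ⟨hij, hj, hvv⟩ := hv
  have hi : i < vals.length := lt_trans hij hj
  unfold simplest
  refine pv_foldl_ge_elem _ (pv_outerMono vals) ((j : Int) - i) ((i : Int), vals.getD i 0)
    ?_ _ 0 ?_
  · intro a
    refine pv_foldl_ge_elem _ (pv_innerMono vals _) ((j : Int) - i) ((j : Int)) ?_ _ a ?_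
    · intro b
      simp only [PySem.List.pyGetD_natCast]
      split_ifs <;> omega
    · rw [PySem.List.mem_pyRange_neg_one]
      refine ⟨?_, by omega⟩
      show (i : Int) < (j : Int)
      exact_mod_cast hij
  · rw [PySem.List.mem_enumerate_iff]
    exact ⟨i, hi, by simp [List.getElem?_eq_getElem hi]⟩

theorem A_cases (vals : List Int) :
    simplest vals = 0 ∨ ∃ i j : Nat, pvValid vals i j ∧ simplest vals = (j : Int) - i := by
  unfold simplest
  have hmain := pv_foldl_cases
    (fun longest p =>
      (PySem.List.pyRange ((vals.length : Int) - 1) p.1 (-1)).foldl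
        (fun longest jj =>
          let right := PySem.List.pyGetD vals jj 0
          if right > p.2 then (if jj - p.1 > longest then jj - p.1 else longest) else longest)
        longest)
    (fun p r => ∃ jj : Int, p.1 < jj ∧ jj < (vals.length : Int) ∧
        p.2 < PySem.List.pyGetD vals jj 0 ∧ r = jj - p.1)
    ?_ (PySem.List.enumerate vals) 0
  · rcases hmain with h | ⟨p, hp, jj, h1, h2, h3, h4⟩
    · left; exact h
    · right
      rw [PySem.List.mem_enumerate_iff] at hp
      obtain ⟨k, hk, rfl⟩ := hp
      have hjj0 : 0 ≤ jj := by simp at h1; omega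
      refine ⟨k, jj.toNat, ⟨?_, ?_, ?_⟩, ?_⟩
      · omega
      · omega
      · have : jj = ((jj.toNat : Nat) : Int) := by omega
        rw [this, PySem.List.pyGetD_natCast] at h3
        simpa [List.getElem?_eq_getElem hk] using h3
      · simp only [h4]; omega
  · intro a p
    have hin := pv_foldl_cases
      (fun longest jj =>
        let right := PySem.List.pyGetD vals jj 0
        if right > p.2 then (if jj - p.1 > longest then jj - p.1 else longest) else longest)
      (fun jj r => p.2 < PySem.List.pyGetD vals jj 0 ∧ r = jj - p.1)
      ?_ (PySem.List.pyRange ((vals.length : Int) - 1) p.1 (-1)) a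
    · rcases hin with h | ⟨jj, hjj, h1, h2⟩
      · left; exact h
      · right
        rw [PySem.List.mem_pyRange_neg_one] at hjj
        exact ⟨jj, hjj.1, by omega, h1, h2⟩
    · intro b jj
      dsimp only
      split_ifs with h1 h2
      · right; exact ⟨h1, rfl⟩
      · left; rfl
      · left; rfl

-- invariant of the prefix-minima list
theorem getD_app_lt (ys : List Int) (z : Int) (i : Nat) (h : i < ys.length) :
    (ys ++ [z]).getD i 0 = ys.getD i 0 := by
  simp [List.getD, List.getElem?_append_left h]

theorem getD_app_len (ys : List Int) (z : Int) :
    (ys ++ [z]).getD ys.length 0 = z := by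
  simp [List.getD]

theorem pvMins_append (ys : List Int) (z : Int) :
    pvMins (ys ++ [z]) = minsStep (pvMins ys) ((ys.length : Int), z) := by
  unfold pvMins
  rw [PySem.List.enumerate_append, List.foldl_append]
  simp [PySem.List.enumerate_cons, PySem.List.enumerate_nil]

theorem mins_inv (vals : List Int) :
    (∀ q ∈ pvMins vals, ∃ i : Nat, i < vals.length ∧ q = (vals.getD i 0, (i : Int)) ∧
        ∀ k, k < i → vals.getD i 0 < vals.getD k 0)
  ∧ (∀ i : Nat, i < vals.length → (∀ k, k < i → vals.getD i 0 < vals.getD k 0) →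
        (vals.getD i 0, (i : Int)) ∈ pvMins vals)
  ∧ (pvMins vals).Pairwise (fun a b => b.1 < a.1 ∧ a.2 < b.2)
  ∧ (∀ q, (pvMins vals).getLast? = some q → ∀ i : Nat, i < vals.length → q.1 ≤ vals.getD i 0)
  ∧ (pvMins vals = [] → vals = []) := by
  induction vals using List.reverseRecOn with
  | nil =>
      have h0 : pvMins ([] : List Int) = [] := rfl
      refine ⟨?_, ?_, ?_, ?_, ?_⟩ <;> simp [h0]
  | append_singleton ys z ih =>
      obtain ⟨S, C, P, L, E⟩ := ih
      have hlen : (ys ++ [z]).length = ys.length + 1 := by simp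
      rw [pvMins_append]
      unfold minsStep
      cases hlast : (pvMins ys).getLast? with
      | none =>
          have hm : pvMins ys = [] := List.getLast?_eq_none_iff.mp hlast
          have hys : ys = [] := E hm
          subst hys
          rw [hm]
          refine ⟨?_, ?_, ?_, ?_, ?_⟩
          · intro q hq
            simp at hq
            refine ⟨0, by simp, by simp [hq], by omega⟩
          · intro i hi _
            simp at hi
            subst hi
            simp
          · simp
          · intro q hq i hi
            simp at hq hi
            subst hi
            simp [← hq]
          · simp
      | some q0 =>
          have hq0mem : q0 ∈ pvMins ys := List.mem_of_getLast? hlast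
          obtain ⟨iq, hiq, hq0eq, _⟩ := S q0 hq0mem
          have hq0le : ∀ i : Nat, i < ys.length → q0.1 ≤ ys.getD i 0 := L q0 hlast
          by_cases hz : z < q0.1
          · -- append case
            simp only [if_pos hz]
            have hsmall : ∀ a ∈ pvMins ys, z < a.1 ∧ a.2 < (ys.length : Int) := by
              intro a ha
              obtain ⟨ia, hia, haeq, _⟩ := S a ha
              refine ⟨?_, ?_⟩
              · have := hq0le ia hia
                rw [haeq]; dsimp; omega
              · rw [haeq]; dsimp; exact_mod_cast hia
            refine ⟨?_, ?_, ?_, ?_, ?_⟩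
            · intro q hq
              rcases List.mem_append.mp hq with hq | hq
              · obtain ⟨i, hi, hqe, hmin⟩ := S q hq
                refine ⟨i, by omega, ?_, ?_⟩
                · rw [getD_app_lt ys z i hi]; exact hqe
                · intro k hk
                  rw [getD_app_lt ys z i hi, getD_app_lt ys z k (by omega)]
                  exact hmin k hk
              · simp at hq
                refine ⟨ys.length, by omega, ?_, ?_⟩
                · rw [getD_app_len, hq]
                · intro k hk
                  rw [getD_app_len, getD_app_lt ys z k hk]
                  have := hq0le k hk
                  omega
            · intro i hi hmin
              rcases Nat.lt_or_ge i ys.length with hi' | hi'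
              · refine List.mem_append.mpr (Or.inl ?_)
                rw [getD_app_lt ys z i hi']
                refine C i hi' ?_
                intro k hk
                have := hmin k hk
                rw [getD_app_lt ys z i hi', getD_app_lt ys z k (by omega)] at this
                exact this
              · have hieq : i = ys.length := by omega
                subst hieq
                rw [getD_app_len]
                simp
            · rw [List.pairwise_append]
              refine ⟨P, by simp, ?_⟩
              intro a ha b hb
              simp at hb
              subst hb
              exact hsmall a ha
            · intro q hq i hi
              rw [List.getLast?_concat] at hq
              cases hq
              rcases Nat.lt_or_ge i ys.length with hi' | hi'
              · rw [getD_app_lt ys z i hi']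
                have := hq0le i hi'
                dsimp
                omega
              · have : i = ys.length := by omega
                subst this
                rw [getD_app_len]
            · simp
          · -- keep case
            simp only [if_neg hz]
            refine ⟨?_, ?_, ?_, ?_, ?_⟩
            · intro q hq
              obtain ⟨i, hi, hqe, hmin⟩ := S q hq
              refine ⟨i, by omega, ?_, ?_⟩
              · rw [getD_app_lt ys z i hi]; exact hqe
              · intro k hk
                rw [getD_app_lt ys z i hi, getD_app_lt ys z k (by omega)]
                exact hmin k hk
            · intro i hi hmin
              rcases Nat.lt_or_ge i ys.length with hi' | hi'
              · rw [getD_app_lt ys z i hi']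
                refine C i hi' ?_
                intro k hk
                have := hmin k hk
                rw [getD_app_lt ys z i hi', getD_app_lt ys z k (by omega)] at this
                exact this
              · have hieq : i = ys.length := by omega
                subst hieq
                exfalso
                have := hmin iq hiq
                rw [getD_app_len, getD_app_lt ys z iq hiq] at this
                have : z < ys.getD iq 0 := this
                have hq1 : q0.1 = ys.getD iq 0 := by rw [hq0eq]
                omega
            · exact P
            · intro q hq i hi
              rw [hlast] at hq
              cases hq
              rcases Nat.lt_or_ge i ys.length with hi' | hi'
              · rw [getD_app_lt ys z i hi']
                exact hq0le i hi'
              · have : i = ys.length := by omega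
                subst this
                rw [getD_app_len]
                omega
            · intro h
              exfalso
              rw [h] at hlast
              simp at hlast

-- the least index with value below x is a strict prefix minimum, hence in pvMins
theorem least_mem_mins (vals : List Int) (x : Int) (k : Nat)
    (hk : k < vals.length) (hvk : vals.getD k 0 < x) :
    ∃ j0 : Nat, j0 ≤ k ∧ j0 < vals.length ∧ vals.getD j0 0 < x ∧
      (vals.getD j0 0, (j0 : Int)) ∈ pvMins vals ∧
      ∀ l : Nat, l < vals.length → vals.getD l 0 < x → j0 ≤ l := by
  obtain ⟨S, C, P, L, E⟩ := mins_inv vals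
  have hex : ∃ m : Nat, m < vals.length ∧ vals.getD m 0 < x := ⟨k, hk, hvk⟩
  classical
  let j0 := Nat.find hex
  have hj0 : j0 < vals.length ∧ vals.getD j0 0 < x := Nat.find_spec hex
  have hleast : ∀ l : Nat, l < vals.length → vals.getD l 0 < x → j0 ≤ l := by
    intro l hl hvl
    exact Nat.find_le ⟨hl, hvl⟩
  have hmin : ∀ l, l < j0 → vals.getD j0 0 < vals.getD l 0 := by
    intro l hl
    have hnot := Nat.find_min hex hl
    push Not at hnot
    have hllen : l < vals.length := lt_trans (lt_of_lt_of_le hl (hleast k hk hvk)) hk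
    have := hnot hllen
    omega
  exact ⟨j0, hleast k hk hvk, hj0.1, hj0.2, C j0 hj0.1 hmin, hleast⟩

theorem find_mins_some (vals : List Int) (x : Int) (q : Int × Int)
    (h : (pvMins vals).find? (fun q => decide (q.1 < x)) = some q) :
    ∃ i : Nat, i < vals.length ∧ q = (vals.getD i 0, (i : Int)) ∧ vals.getD i 0 < x ∧
      ∀ k : Nat, k < vals.length → vals.getD k 0 < x → i ≤ k := by
  obtain ⟨S, C, P, L, E⟩ := mins_inv vals
  have hqmem : q ∈ pvMins vals := List.mem_of_find?_eq_some h
  obtain ⟨i, hi, hqe, _⟩ := S q hqmem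
  have hqx : q.1 < x := by simpa using List.find?_some h
  have hvix : vals.getD i 0 < x := by rw [hqe] at hqx; exact hqx
  refine ⟨i, hi, hqe, hvix, ?_⟩
  intro k hk hvk
  obtain ⟨j0, hj0k, hj0len, hj0x, hj0mem, _⟩ := least_mem_mins vals x k hk hvk
  rw [List.find?_eq_some_iff_append] at h
  obtain ⟨_, as, bs, hsplit, hfail⟩ := h
  rw [hsplit] at hj0mem
  rcases List.mem_append.mp hj0mem with hcase | hcase
  · exact absurd (by simpa using hj0x) (by simpa using hfail _ hcase)
  · rcases List.mem_cons.mp hcase with hcase | hcase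
    · have : (i : Int) = (j0 : Int) := by
        have := congrArg Prod.snd hcase
        rw [hqe] at this
        simpa using this.symm
      omega
    · rw [hsplit, List.pairwise_append] at P
      have := (List.pairwise_cons.mp P.2.1).1 _ hcase
      rw [hqe] at this
      have h2 : (i : Int) < (j0 : Int) := by simpa using this.2
      omega

theorem find_mins_isSome (vals : List Int) (x : Int) (i : Nat)
    (hi : i < vals.length) (hv : vals.getD i 0 < x) :
    ∃ q, (pvMins vals).find? (fun q => decide (q.1 < x)) = some q := by
  obtain ⟨j0, _, _, hj0x, hj0mem, _⟩ := least_mem_mins vals x i hi hv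
  cases hf : (pvMins vals).find? (fun q => decide (q.1 < x)) with
  | some q => exact ⟨q, rfl⟩
  | none =>
      exfalso
      rw [List.find?_eq_none] at hf
      exact absurd (by simpa using hj0x) (by simpa using hf _ hj0mem)

theorem pv_BMono (vals : List Int) :
    ∀ (a : Int) (p : Int × Int),
      a ≤ (match (pvMins vals).find? (fun q => decide (q.1 < p.2)) with
           | none => a
           | some q => if q.2 < p.1 then (if p.1 - q.2 > a then p.1 - q.2 else a) else a) := by
  intro a p
  cases (pvMins vals).find? (fun q => decide (q.1 < p.2)) with
  | none => exact le_refl a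
  | some q =>
      dsimp only
      split_ifs with h1 h2
      · exact le_of_lt h2
      · exact le_refl a
      · exact le_refl a

theorem B_nonneg (vals : List Int) : 0 ≤ simplest_alt vals := by
  unfold simplest_alt
  exact pv_foldl_ge_init _ (pv_BMono vals) _ 0

theorem B_ge (vals : List Int) (i j : Nat) (hv : pvValid vals i j) :
    ((j : Int) - i) ≤ simplest_alt vals := by
  obtain ⟨hij, hj, hvv⟩ := hv
  have hi : i < vals.length := lt_trans hij hj
  obtain ⟨q, hq⟩ := find_mins_isSome vals (vals.getD j 0) i hi hvv
  obtain ⟨i1, hi1, hqe, _, hleast⟩ := find_mins_some vals (vals.getD j 0) q hq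
  have hi1i : i1 ≤ i := hleast i hi hvv
  unfold simplest_alt
  refine pv_foldl_ge_elem _ (pv_BMono vals) ((j : Int) - i) ((j : Int), vals.getD j 0)
    ?_ _ 0 ?_
  · intro a
    dsimp only
    rw [hq, hqe]
    dsimp only
    have hcast : ((i1 : Int)) ≤ (i : Int) := by exact_mod_cast hi1i
    split_ifs with h1 h2
    · exact sub_le_sub_left hcast _
    · exact le_trans (sub_le_sub_left hcast _) (not_lt.mp h2)
    · exact absurd (by exact_mod_cast lt_of_le_of_lt hi1i hij) h1
  · rw [PySem.List.mem_enumerate_iff]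
    exact ⟨j, hj, by simp [List.getElem?_eq_getElem hj]⟩

theorem B_cases (vals : List Int) :
    simplest_alt vals = 0 ∨ ∃ i j : Nat, pvValid vals i j ∧ simplest_alt vals = (j : Int) - i := by
  unfold simplest_alt
  have hmain := pv_foldl_cases
    (fun best p =>
      match (pvMins vals).find? (fun q => decide (q.1 < p.2)) with
      | none => best
      | some q => if q.2 < p.1 then (if p.1 - q.2 > best then p.1 - q.2 else best) else best)
    (fun p r => ∃ i1 : Nat, i1 < vals.length ∧ vals.getD i1 0 < p.2 ∧ ((i1 : Int) < p.1) ∧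
        r = p.1 - (i1 : Int))
    ?_ (PySem.List.enumerate vals) 0
  · rcases hmain with h | ⟨p, hp, i1, hi1, hlt, hip, hr⟩
    · left; exact h
    · right
      rw [PySem.List.mem_enumerate_iff] at hp
      obtain ⟨k, hk, rfl⟩ := hp
      refine ⟨i1, k, ⟨by exact_mod_cast (by simpa using hip), hk, ?_⟩, by simpa using hr⟩
      simpa [List.getElem?_eq_getElem hk, List.getD] using hlt
  · intro a p
    cases hf : (pvMins vals).find? (fun q => decide (q.1 < p.2)) with
    | none =>
        left
        dsimp only
        rw [hf]
    | some q =>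
        obtain ⟨i1, hi1, hqe, hvx, _⟩ := find_mins_some vals p.2 q hf
        dsimp only
        rw [hf]
        dsimp only
        split_ifs with h1 h2
        · right
          refine ⟨i1, hi1, hvx, ?_, ?_⟩
          · rw [hqe] at h1; exact h1
          · rw [hqe]
        · left; rfl
        · left; rfl

-- ===== VERDICT (by name: the statement is the Claim_ definition above) =====
theorem simplest_spec : Claim_equal_simplest := by
  intro vals _
  unfold Spec_simplest
  apply le_antisymm
  · rcases A_cases vals with h | ⟨i, j, hv, h⟩
    · rw [h]; exact B_nonneg vals
    · rw [h]; exact B_ge vals i j hv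
  · rcases B_cases vals with h | ⟨i, j, hv, h⟩
    · rw [h]; exact A_nonneg vals
    · rw [h]; exact A_ge vals i j hv
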